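-- pv_equiv track=rewrite | github.com/J-H-C-037/Subject-EDA | EDA/finals/Divide&Conquer.py | l_multiples
-- ===== SOURCE A (Python) =====
-- def l_multiples(l, z):
--     if len(l) == 0 or l is None:
--         return []
--     mid = len(l)//2
--     result = []
--     if l[mid] % z == 0:
--         result.append(l[mid])
--
--     left = l_multiples(l[:mid],z)
--     right = l_multiples(l[mid +1:],z)
--
--     return left + right + result
-- ===== SOURCE B (Python) =====
-- def l_multiples(l, z):
--     # Explicit-stack post-order over index segments instead of slicing recursion.
--     n = len(l)  # raises TypeError on None, like A's len(l)
--     res = []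
--     stack = [(False, 0, n)]
--     while stack:
--         is_emit, lo, hi = stack.pop()
--         if is_emit:
--             if l[lo] % z == 0:
--                 res.append(l[lo])
--         elif lo < hi:
--             mid = (lo + hi) // 2
--             stack.append((True, mid, mid))
--             stack.append((False, mid + 1, hi))
--             stack.append((False, lo, mid))
--     return res
-- ===== Notes on version B (the rewrite author's own statement) =====
-- stated objective: alternative
-- what changed: Replaces the slicing recursion with an explicit stack of index segments: no list slices are allocated, the same left/right/mid post-order is produced by pushing segment and emit tasks onto one stack and appending into a single result list.
import Mathlib
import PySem

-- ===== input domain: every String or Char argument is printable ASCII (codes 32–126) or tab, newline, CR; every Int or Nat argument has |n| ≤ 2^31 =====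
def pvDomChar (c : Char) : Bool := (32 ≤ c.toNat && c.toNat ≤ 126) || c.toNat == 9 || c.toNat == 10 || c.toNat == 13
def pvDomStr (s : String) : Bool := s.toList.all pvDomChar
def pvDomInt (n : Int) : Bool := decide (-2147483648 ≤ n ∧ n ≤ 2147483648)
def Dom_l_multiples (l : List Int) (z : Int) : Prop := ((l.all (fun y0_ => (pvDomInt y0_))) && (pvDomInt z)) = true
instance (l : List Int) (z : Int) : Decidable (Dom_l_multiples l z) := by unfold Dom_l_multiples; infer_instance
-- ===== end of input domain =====

-- B replaces A's slicing recursion by an explicit stack of index segments (same post-order output); objective: alternative decomposition, no slice copies.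

-- ===== PORT A =====
-- l[mid] with 0 ≤ mid < len(l) is exact as l.getD mid 0; l[:mid] = take mid, l[mid+1:] = drop (mid+1) (nonnegative in-range bounds, exact).
def l_multiples (l : List Int) (z : Int) : List Int :=
  if _h0 : l.length = 0 then []
  else
    l_multiples (l.take (l.length / 2)) z ++ l_multiples (l.drop (l.length / 2 + 1)) z ++
      (if PySem.Int.mod (l.getD (l.length / 2) 0) z = 0 then [l.getD (l.length / 2) 0] else [])
termination_by l.length
decreasing_by
  · simp [List.length_take]; omega
  · simp; omega

-- ===== PORT B =====
-- a stack task: (is_emit, lo, hi) in Source B; emit carries the index (hi is unused there)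
inductive PVTask where
  | range : Nat → Nat → PVTask
  | emit : Nat → PVTask
deriving DecidableEq, Repr

def pvWeight : PVTask → Nat
  | .range lo hi => 3 * (hi - lo) + 1
  | .emit _ => 1

def pvWSum (st : List PVTask) : Nat := (st.map pvWeight).sum

def l_multiples_alt_loop (l : List Int) (z : Int) : List PVTask → List Int → List Int
  | [], res => res
  | .emit i :: rest, res =>
      l_multiples_alt_loop l z rest
        (if PySem.Int.mod (l.getD i 0) z = 0 then res ++ [l.getD i 0] else res)
  | .range lo hi :: rest, res =>
      if lo < hi then
        l_multiples_alt_loop l z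
          (.range lo ((lo + hi) / 2) :: .range ((lo + hi) / 2 + 1) hi :: .emit ((lo + hi) / 2) :: rest) res
      else
        l_multiples_alt_loop l z rest res
termination_by st => pvWSum st
decreasing_by
  · simp [pvWSum, pvWeight]
  · simp only [pvWSum, pvWeight, List.map_cons, List.sum_cons]; omega
  · simp [pvWSum, pvWeight]

def l_multiples_alt (l : List Int) (z : Int) : List Int :=
  l_multiples_alt_loop l z [PVTask.range 0 l.length] []

-- ===== PRECONDITION & SPEC =====
-- Pre_ excludes exactly the inputs where Python raises: z = 0 with a nonempty list makes `l[mid] % z` raise ZeroDivisionError (in both A and B).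
def Pre_l_multiples (l : List Int) (z : Int) : Prop := l = [] ∨ z ≠ 0
instance (l : List Int) (z : Int) : Decidable (Pre_l_multiples l z) := by unfold Pre_l_multiples; infer_instance

def pvWitness_l_multiples : List Int × Int := ([6, 3, 4, -9], 3)

def Spec_l_multiples (l : List Int) (z : Int) (out : List Int) : Prop := out = l_multiples_alt l z
instance (l : List Int) (z : Int) (out : List Int) : Decidable (Spec_l_multiples l z out) := by unfold Spec_l_multiples; infer_instance

-- ===== CLAIM (what is proved, stated in full; the proofs are below) =====
def Claim_equal_l_multiples : Prop := ∀ (l : List Int) (z : Int), Dom_l_multiples l z → Pre_l_multiples l z → Spec_l_multiples l z (l_multiples l z)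

-- ===== LEMMAS AND PROOFS =====

-- reference index-segment function: what both programs compute on segment [lo, hi)
def pvSeg (l : List Int) (z : Int) (lo hi : Nat) : List Int :=
  if lo < hi then
    pvSeg l z lo ((lo + hi) / 2) ++ pvSeg l z ((lo + hi) / 2 + 1) hi ++
      (if PySem.Int.mod (l.getD ((lo + hi) / 2) 0) z = 0 then [l.getD ((lo + hi) / 2) 0] else [])
  else []
termination_by hi - lo
decreasing_by all_goals omega

def pvOut (l : List Int) (z : Int) : PVTask → List Int
  | .range lo hi => pvSeg l z lo hi
  | .emit i => if PySem.Int.mod (l.getD i 0) z = 0 then [l.getD i 0] else []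

-- pvSeg depends only on the entries in [lo, hi)
theorem pvSeg_congr (l₁ l₂ : List Int) (z : Int) (lo hi : Nat)
    (h : ∀ i, lo ≤ i → i < hi → l₁.getD i 0 = l₂.getD i 0) :
    pvSeg l₁ z lo hi = pvSeg l₂ z lo hi := by
  induction hn : hi - lo using Nat.strong_induction_on generalizing lo hi with
  | _ n ih =>
    conv_lhs => rw [pvSeg]
    conv_rhs => rw [pvSeg]
    by_cases hlt : lo < hi
    · simp only [if_pos hlt]
      rw [ih ((lo + hi) / 2 - lo) (by omega) lo ((lo + hi) / 2)
            (fun i h1 h2 => h i h1 (by omega)) rfl,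
          ih (hi - ((lo + hi) / 2 + 1)) (by omega) ((lo + hi) / 2 + 1) hi
            (fun i h1 h2 => h i (by omega) h2) rfl,
          h _ (by omega) (by omega)]
    · simp only [if_neg hlt]

-- shift: pvSeg on a dropped list equals pvSeg on the original with shifted bounds
theorem pvSeg_drop (l : List Int) (z : Int) (k lo hi : Nat) :
    pvSeg (l.drop k) z lo hi = pvSeg l z (lo + k) (hi + k) := by
  induction hn : hi - lo using Nat.strong_induction_on generalizing lo hi with
  | _ n ih =>
    conv_lhs => rw [pvSeg]
    conv_rhs => rw [pvSeg]
    have hget : ∀ i : Nat, (l.drop k).getD i 0 = l.getD (i + k) 0 := by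
      intro i
      simp [List.getD, List.getElem?_drop, Nat.add_comm]
    by_cases hlt : lo < hi
    · have h2 : (lo + k + (hi + k)) / 2 = (lo + hi) / 2 + k := by omega
      have h3 : (lo + hi) / 2 + 1 + k = (lo + hi) / 2 + k + 1 := by omega
      simp only [if_pos hlt, if_pos (show lo + k < hi + k by omega), h2]
      rw [ih ((lo + hi) / 2 - lo) (by omega) lo ((lo + hi) / 2) rfl,
          ih (hi - ((lo + hi) / 2 + 1)) (by omega) ((lo + hi) / 2 + 1) hi rfl,
          hget, h3]
    · simp only [if_neg hlt, if_neg (show ¬ lo + k < hi + k by omega)]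

-- A's port computes pvSeg over the whole index range
theorem l_multiples_eq_pvSeg (l : List Int) (z : Int) :
    l_multiples l z = pvSeg l z 0 l.length := by
  induction hn : l.length using Nat.strong_induction_on generalizing l with
  | _ n ih =>
    subst hn
    by_cases h0 : l.length = 0
    · rw [l_multiples, pvSeg, dif_pos h0, if_neg (by omega)]
    · have htake : (l.take (l.length / 2)).length = l.length / 2 := by
        simp; omega
      have hdrop : (l.drop (l.length / 2 + 1)).length = l.length - (l.length / 2 + 1) := by
        simp
      have e1 : l.length - (l.length / 2 + 1) + (l.length / 2 + 1) = l.length := by omega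
      have e2 : (0 : Nat) + (l.length / 2 + 1) = l.length / 2 + 1 := by omega
      have hmid : (0 + l.length) / 2 = l.length / 2 := by omega
      rw [l_multiples, dif_neg h0]
      conv_rhs => rw [pvSeg]
      rw [if_pos (show 0 < l.length by omega), hmid,
          ih (l.length / 2) (by omega) _ htake,
          ih (l.length - (l.length / 2 + 1)) (by omega) _ hdrop,
          pvSeg_congr (l.take (l.length / 2)) l z 0 (l.length / 2)
            (fun i _ h2 => by simp [List.getD, h2]),
          pvSeg_drop l z (l.length / 2 + 1) 0 (l.length - (l.length / 2 + 1)),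
          e2, e1]

-- stack invariant: the loop appends the concatenation of each task's output
theorem loop_eq (l : List Int) (z : Int) (st : List PVTask) (res : List Int) :
    l_multiples_alt_loop l z st res = res ++ (st.map (pvOut l z)).flatten := by
  induction hn : pvWSum st using Nat.strong_induction_on generalizing st res with
  | _ n ih =>
    match st with
    | [] => simp [l_multiples_alt_loop]
    | .emit i :: rest =>
      rw [l_multiples_alt_loop,
          ih (pvWSum rest) (by simp [pvWSum, pvWeight] at hn ⊢; omega) rest _ rfl]
      simp only [List.map_cons, List.flatten_cons, pvOut]
      split <;> simp
    | .range lo hi :: rest =>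
      rw [l_multiples_alt_loop]
      by_cases hlt : lo < hi
      · rw [if_pos hlt]
        have hdec : pvWSum (PVTask.range lo ((lo + hi) / 2) ::
            PVTask.range ((lo + hi) / 2 + 1) hi :: PVTask.emit ((lo + hi) / 2) :: rest) < n := by
          simp only [pvWSum, pvWeight, List.map_cons, List.sum_cons] at hn ⊢
          omega
        rw [ih _ hdec _ _ rfl]
        simp only [List.map_cons, List.flatten_cons, pvOut]
        conv_rhs => rw [pvSeg, if_pos hlt]
        simp
      · rw [if_neg hlt,
            ih (pvWSum rest) (by simp [pvWSum, pvWeight] at hn ⊢; omega) rest _ rfl]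
        simp only [List.map_cons, List.flatten_cons, pvOut]
        conv_rhs => rw [pvSeg, if_neg hlt]
        simp

theorem alt_eq_pvSeg (l : List Int) (z : Int) :
    l_multiples_alt l z = pvSeg l z 0 l.length := by
  rw [l_multiples_alt, loop_eq]
  simp [pvOut]

-- ===== VERDICT (by name: the statement is the Claim_ definition above) =====
theorem l_multiples_spec : Claim_equal_l_multiples := by
  intro l z _ _
  unfold Spec_l_multiples
  rw [l_multiples_eq_pvSeg, alt_eq_pvSeg]
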